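-- pv_equiv track=rewrite | github.com/mathieu-lemay/aoc-2019-py | aoc/d16.py | fft2
-- ===== SOURCE A (Python) =====
-- def fft2(signal, passes):
--     siglen = len(signal)
--
--     for _ in range(passes):
--         output = [0] * siglen
--         res = 0
--         for out_idx in range(siglen):
--             i = siglen - out_idx - 1
--
--             res += signal[i]
--
--             output[i] = abs(res) % 10
--
--         signal = output
--
--     return signal
-- ===== SOURCE B (Python) =====
-- def fft2(sig, passes):
--     for _ in range(passes):
--         prefix = [0]
--         acc = 0
--         for x in sig:
--             acc += x
--             prefix.append(acc)
--         total = prefix[-1]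
--         sig = [abs(total - prefix[i]) % 10 for i in range(len(sig))]
--     return sig
-- ===== Notes on version B (the rewrite author's own statement) =====
-- stated objective: alternative
-- what changed: Replaces the single backward running-accumulator scan per pass with a two-phase forward decomposition: first build a prefix-sum table and capture the grand total, then map output[i] = abs(total - prefix[i]) % 10 over the indices.
import Mathlib
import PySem

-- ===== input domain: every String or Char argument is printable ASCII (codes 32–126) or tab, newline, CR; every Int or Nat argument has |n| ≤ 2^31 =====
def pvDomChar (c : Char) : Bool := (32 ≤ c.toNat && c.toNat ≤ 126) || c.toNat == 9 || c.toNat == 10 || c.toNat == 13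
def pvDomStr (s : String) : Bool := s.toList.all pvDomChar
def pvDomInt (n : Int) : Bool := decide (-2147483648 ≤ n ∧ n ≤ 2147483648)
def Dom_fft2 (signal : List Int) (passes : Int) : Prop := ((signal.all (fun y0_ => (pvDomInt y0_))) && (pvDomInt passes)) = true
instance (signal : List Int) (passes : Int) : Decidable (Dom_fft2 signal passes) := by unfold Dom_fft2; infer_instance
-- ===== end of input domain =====

-- B replaces A's single backward running-accumulator pass with a two-phase forward
-- decomposition (build prefix-sum table, then map abs(total - prefix[i]) % 10); same cost.

-- ===== PORT A =====
-- one pass of A: backward scan via out_idx, running accumulator res, in-place sets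
def fft2PassA (signal : List Int) : List Int :=
  let siglen : Int := (signal.length : Int)
  let st := (PySem.List.pyRange 0 siglen 1).foldl
    (fun (st : List Int × Int) outIdx =>
      let i := siglen - outIdx - 1
      let res := st.2 + PySem.List.pyGetD signal i 0
      (PySem.List.pySetD st.1 i (PySem.Int.mod |res| 10), res))
    (List.replicate siglen.toNat 0, 0)
  st.1

def fft2 (signal : List Int) (passes : Int) : List Int :=
  (PySem.List.pyRange 0 passes 1).foldl (fun sig _ => fft2PassA sig) signal

-- ===== PORT B =====
-- one pass of B: build prefix-sum table forward, then map over the indices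
def fft2PassB (signal : List Int) : List Int :=
  let pr := signal.foldl
    (fun (st : List Int × Int) x => (st.1 ++ [st.2 + x], st.2 + x)) ([0], 0)
  let pfx := pr.1
  let total := PySem.List.pyGetD pfx (-1) 0
  (PySem.List.pyRange 0 (signal.length : Int) 1).map
    (fun i => PySem.Int.mod |total - PySem.List.pyGetD pfx i 0| 10)

def fft2_alt (signal : List Int) (passes : Int) : List Int :=
  (PySem.List.pyRange 0 passes 1).foldl (fun sig _ => fft2PassB sig) signal

-- ===== PRECONDITION & SPEC =====
def Spec_fft2 (signal : List Int) (passes : Int) (out : List Int) : Prop := out = fft2_alt signal passes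
instance (signal : List Int) (passes : Int) (out : List Int) : Decidable (Spec_fft2 signal passes out) := by unfold Spec_fft2; infer_instance

-- ===== CLAIM (what is proved, stated in full; the proofs are below) =====
def Claim_equal_fft2 : Prop := ∀ (signal : List Int) (passes : Int), Dom_fft2 signal passes → Spec_fft2 signal passes (fft2 signal passes)

-- ===== LEMMAS AND PROOFS =====

-- the common reference value: |suffix sum from j| % 10
def pvRef (signal : List Int) (j : Nat) : Int :=
  PySem.Int.mod |((signal.drop j).sum)| 10

-- B's prefix-building fold, characterised
lemma pvPrefixFold (xs : List Int) : ∀ (p0 : List Int) (a : Int),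
    xs.foldl (fun (st : List Int × Int) x => (st.1 ++ [st.2 + x], st.2 + x)) (p0, a)
      = (p0 ++ (List.range xs.length).map (fun k => a + (xs.take (k+1)).sum), a + xs.sum) := by
  induction xs with
  | nil => intro p0 a; simp
  | cons x t ih =>
    intro p0 a
    simp only [List.foldl_cons, ih, List.length_cons, List.range_succ_eq_map, Prod.mk.injEq]
    refine ⟨?_, by simp [List.sum_cons]; ring⟩
    rw [List.append_assoc, List.singleton_append, List.map_cons, List.map_map]
    congr 1
    congr 1
    · simp
    · apply List.map_congr_left
      intro k _
      simp only [Function.comp, List.take_succ_cons, List.sum_cons]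
      ring

lemma pvPassB (signal : List Int) :
    fft2PassB signal = (List.range signal.length).map (pvRef signal) := by
  unfold fft2PassB
  rw [pvPrefixFold]
  simp only [zero_add, List.singleton_append]
  have hlast : PySem.List.pyGetD
      ((0 : Int) :: (List.range signal.length).map (fun k => ((signal.take (k+1)).sum : Int))) (-1) 0
      = signal.sum := by
    rcases List.eq_nil_or_concat signal with h | ⟨ys, y, h⟩
    · subst h
      simp only [List.length_nil, List.range_zero, List.map_nil, List.sum_nil]
      rw [PySem.List.pyGetD_neg_one _ _ (by simp)]
      simp
    · have hlen : signal.length = ys.length + 1 := by rw [h]; simp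
      have : (0 : Int) :: (List.range signal.length).map (fun k => ((signal.take (k+1)).sum : Int))
          = ((0 : Int) :: (List.range ys.length).map (fun k => ((signal.take (k+1)).sum : Int))) ++ [signal.sum] := by
        rw [hlen, List.range_succ, List.map_append]
        simp [h]
      rw [this, PySem.List.pyGetD_neg_one_append_singleton]
  rw [PySem.List.pyRange_one]
  simp only [sub_zero, Int.toNat_natCast, List.map_map]
  apply List.map_congr_left
  intro k hk
  have hk' : k < signal.length := List.mem_range.mp hk
  simp only [Function.comp, zero_add]
  rw [hlast]
  have hpre : PySem.List.pyGetD
      ((0 : Int) :: (List.range signal.length).map (fun k => ((signal.take (k+1)).sum : Int))) (k : Int) 0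
      = (signal.take k).sum := by
    cases k with
    | zero => simp [PySem.List.pyGetD_zero_cons]
    | succ m =>
      rw [PySem.List.pyGetD_natCast]
      have hm : m < signal.length := by omega
      simp [List.getD, hm]
  rw [hpre]
  unfold pvRef
  congr 2
  have := List.sum_take_add_sum_drop signal k
  omega

-- A's inner fold, characterised: after k steps positions n-k..n-1 hold the reference values
lemma pvPassAFold (signal : List Int) : ∀ (k : Nat), k ≤ signal.length →
    (PySem.List.pyRange 0 (k : Int) 1).foldl
      (fun (st : List Int × Int) outIdx =>
        let i := (signal.length : Int) - outIdx - 1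
        let res := st.2 + PySem.List.pyGetD signal i 0
        (PySem.List.pySetD st.1 i (PySem.Int.mod |res| 10), res))
      (List.replicate signal.length 0, 0)
      = ((List.range signal.length).map
          (fun j => if signal.length - k ≤ j then pvRef signal j else 0),
         (signal.drop (signal.length - k)).sum) := by
  intro k
  induction k with
  | zero =>
    intro _
    rw [show ((0 : Nat) : Int) = 0 by norm_num, PySem.List.pyRange_one_eq_nil le_rfl]
    simp only [List.foldl_nil, Nat.sub_zero, Prod.mk.injEq]
    refine ⟨?_, by simp⟩
    apply List.ext_getElem (by simp)
    intro j h1 h2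
    simp only [List.length_map, List.length_range] at h2
    simp only [List.getElem_replicate, List.getElem_map, List.getElem_range]
    rw [if_neg (by omega)]
  | succ k ih =>
    intro hk
    have hk' : k ≤ signal.length := by omega
    rw [show ((k + 1 : Nat) : Int) = (k : Int) + 1 by push_cast; ring,
        PySem.List.pyRange_one_succ_right (by positivity : (0:Int) ≤ (k:Int)),
        List.foldl_append, ih hk']
    simp only [List.foldl_cons, List.foldl_nil]
    have hidx : (signal.length : Int) - (k : Int) - 1 = ((signal.length - k - 1 : Nat) : Int) := by
      omega
    rw [hidx]
    have hlt : signal.length - k - 1 < signal.length := by omega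
    have hget : PySem.List.pyGetD signal ((signal.length - k - 1 : Nat) : Int) 0
        = signal[signal.length - k - 1]'hlt := by
      rw [PySem.List.pyGetD_natCast]
      simp [List.getD, List.getElem?_eq_getElem hlt]
    have hdrop : (signal.drop (signal.length - k)).sum + signal[signal.length - k - 1]'hlt
        = (signal.drop (signal.length - (k+1))).sum := by
      have hd := List.drop_eq_getElem_cons hlt
      rw [show signal.length - k - 1 + 1 = signal.length - k from by omega] at hd
      rw [show signal.length - (k+1) = signal.length - k - 1 from by omega, hd, List.sum_cons]
      ring
    simp only [Prod.mk.injEq]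
    refine ⟨?_, by rw [hget]; exact hdrop⟩
    rw [PySem.List.pySetD_natCast]
    apply List.ext_getElem (by simp)
    intro j h1 h2
    simp only [List.length_map, List.length_range] at h2
    simp only [List.getElem_set, List.getElem_map, List.getElem_range]
    by_cases hj : signal.length - k - 1 = j
    · rw [if_pos hj, if_pos (by omega)]
      rw [hget, hdrop, show signal.length - (k+1) = j from by omega]
      rfl
    · rw [if_neg hj]
      by_cases hj2 : signal.length - k ≤ j
      · rw [if_pos hj2, if_pos (by omega)]
      · rw [if_neg hj2, if_neg (by omega)]

lemma pvPassA (signal : List Int) :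
    fft2PassA signal = (List.range signal.length).map (pvRef signal) := by
  unfold fft2PassA
  have h := pvPassAFold signal signal.length le_rfl
  simp only [Int.toNat_natCast] at h ⊢
  rw [h]
  apply List.map_congr_left
  intro j hj
  rw [if_pos (by omega)]

lemma pvPassEq : fft2PassA = fft2PassB := by
  funext signal
  rw [pvPassA, pvPassB]

-- ===== VERDICT (by name: the statement is the Claim_ definition above) =====
theorem fft2_spec : Claim_equal_fft2 := by
  intro signal passes _
  unfold Spec_fft2 fft2 fft2_alt
  rw [pvPassEq]
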